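-- pv_equiv track=rewrite | github.com/xiaolingu/mac_fingerprinting | prase_test.py | single_circle_seq_cal
-- ===== SOURCE A (Python) =====
-- def single_circle_seq_cal(raw_data, uptime):
--     scanning_time = []
--     scanning_seq = []
--     cnt = 0
--     curr_seq = 0
--     prev_seq = 0
--     curr_ts = 0
--     prev_ts = 0
--     for j in raw_data:
--         if cnt == 0:
--             prev_ts = j['time']
--             curr_ts = prev_ts
--             prev_seq = j['seq']
--             curr_seq = prev_seq
--         else:
--             curr_ts = j['time']
--             curr_seq = j['seq']
--             if (curr_ts - prev_ts) > uptime: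
--                 scanning_time.append(curr_ts - prev_ts)
--                 scanning_seq.append((curr_seq - prev_seq + 4096) % 4096)
--         cnt = cnt + 1
--         prev_ts = curr_ts
--         prev_seq = curr_seq
--     print (scanning_seq)
--     return scanning_seq
-- ===== SOURCE B (Python) =====
-- def single_circle_seq_cal(raw_data, uptime):
--     # staged passes: extract columns, compute all deltas, then select
--     times = [j['time'] for j in raw_data]
--     seqs = [j['seq'] for j in raw_data]
--     dts = [b - a for a, b in zip(times, times[1:])]
--     dss = [(b - a) % 4096 for a, b in zip(seqs, seqs[1:])]
--     scanning_seq = [ds for dt, ds in zip(dts, dss) if dt > uptime]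
--     print(scanning_seq)
--     return scanning_seq
-- ===== Notes on version B (the rewrite author's own statement) =====
-- stated objective: simpler
-- what changed: Replaces A's single stateful cnt/prev/curr loop with staged column passes: extract the time and seq columns, compute full delta lists (using Python's % directly instead of the +4096 trick), then filter the seq deltas by the time deltas; the unused scanning_time list is dropped.
import Mathlib
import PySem

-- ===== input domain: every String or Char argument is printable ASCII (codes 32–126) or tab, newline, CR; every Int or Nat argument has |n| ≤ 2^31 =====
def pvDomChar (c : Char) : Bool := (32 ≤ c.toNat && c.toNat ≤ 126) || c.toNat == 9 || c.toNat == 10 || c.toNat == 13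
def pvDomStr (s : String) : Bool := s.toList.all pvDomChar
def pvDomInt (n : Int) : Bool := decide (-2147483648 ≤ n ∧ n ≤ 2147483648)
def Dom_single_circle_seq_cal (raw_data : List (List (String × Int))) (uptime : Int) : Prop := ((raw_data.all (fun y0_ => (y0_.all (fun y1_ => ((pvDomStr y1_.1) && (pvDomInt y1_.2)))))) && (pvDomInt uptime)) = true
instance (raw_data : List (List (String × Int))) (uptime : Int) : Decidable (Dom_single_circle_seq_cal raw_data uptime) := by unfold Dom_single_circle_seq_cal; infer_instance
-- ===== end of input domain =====

-- B replaces A's stateful cnt/prev/curr loop by staged column passes (extract the time and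
-- seq columns, compute full delta lists, then select); the equivalence is about the return
-- value only (both Pythons also print scanning_seq, a side effect not modelled).

-- dict lookup j[k]: first match in the association list; Pre_ guarantees the key is present,
-- so the default 0 is never used on admitted inputs.
def pvLookup (j : List (String × Int)) (k : String) : Int := (j.lookup k).getD 0

-- ===== PORT A =====
-- state: (scanning_time, scanning_seq, cnt, prev_ts, prev_seq); curr_* are assigned into
-- prev_* at the end of every iteration, so they are the element's own values in the state.
def single_circle_seq_cal (raw_data : List (List (String × Int))) (uptime : Int) : List Int :=
  (raw_data.foldl (fun st j =>
      let t := pvLookup j "time"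
      let s := pvLookup j "seq"
      if st.2.2.1 = 0 then (st.1, st.2.1, st.2.2.1 + 1, t, s)
      else if t - st.2.2.2.1 > uptime then
        (st.1 ++ [t - st.2.2.2.1],
         st.2.1 ++ [PySem.Int.mod (s - st.2.2.2.2 + 4096) 4096],
         st.2.2.1 + 1, t, s)
      else (st.1, st.2.1, st.2.2.1 + 1, t, s))
    (([] : List Int), ([] : List Int), (0 : Int), (0 : Int), (0 : Int))).2.1

-- ===== PORT B =====
def single_circle_seq_cal_alt (raw_data : List (List (String × Int))) (uptime : Int) : List Int :=
  let times := raw_data.map (fun j => pvLookup j "time")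
  let seqs := raw_data.map (fun j => pvLookup j "seq")
  let dts := (times.zip (times.drop 1)).map (fun p => p.2 - p.1)
  let dss := (seqs.zip (seqs.drop 1)).map (fun p => PySem.Int.mod (p.2 - p.1) 4096)
  (dts.zip dss).filterMap (fun p => if p.1 > uptime then some p.2 else none)

-- ===== PRECONDITION & SPEC =====
-- Pre_ excludes exactly the inputs where A raises KeyError: some element lacks key "time" or "seq".
def Pre_single_circle_seq_cal (raw_data : List (List (String × Int))) (uptime : Int) : Prop :=
  ∀ j ∈ raw_data, (j.lookup "time").isSome ∧ (j.lookup "seq").isSome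

instance (raw_data : List (List (String × Int))) (uptime : Int) : Decidable (Pre_single_circle_seq_cal raw_data uptime) := by unfold Pre_single_circle_seq_cal; infer_instance

def pvWitness_single_circle_seq_cal : (List (List (String × Int))) × Int :=
  ([[("time", 0), ("seq", 10)], [("time", 100), ("seq", 5)]], 50)

def Spec_single_circle_seq_cal (raw_data : List (List (String × Int))) (uptime : Int) (out : List Int) : Prop := out = single_circle_seq_cal_alt raw_data uptime
instance (raw_data : List (List (String × Int))) (uptime : Int) (out : List Int) : Decidable (Spec_single_circle_seq_cal raw_data uptime out) := by unfold Spec_single_circle_seq_cal; infer_instance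

-- ===== CLAIM (what is proved, stated in full; the proofs are below) =====
def Claim_equal_single_circle_seq_cal : Prop := ∀ (raw_data : List (List (String × Int))) (uptime : Int), Dom_single_circle_seq_cal raw_data uptime → Pre_single_circle_seq_cal raw_data uptime → Spec_single_circle_seq_cal raw_data uptime (single_circle_seq_cal raw_data uptime)

-- ===== LEMMAS AND PROOFS =====

-- pairwise core: deltas of consecutive elements, threading the previous element's values
def pvCore (uptime : Int) (t s : Int) : List (List (String × Int)) → List Int
  | [] => []
  | j :: l =>
      let tj := pvLookup j "time"
      let sj := pvLookup j "seq"
      (if tj - t > uptime then [PySem.Int.mod (sj - s) 4096] else []) ++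
        pvCore uptime tj sj l

lemma pvmod_add (x : Int) : PySem.Int.mod (x + 4096) 4096 = PySem.Int.mod x 4096 := by
  rw [PySem.Int.mod_eq_emod_of_pos (by norm_num),
      PySem.Int.mod_eq_emod_of_pos (by norm_num), Int.add_emod_right]

lemma alt_cons (uptime : Int) (j : List (String × Int)) (l : List (List (String × Int))) :
    single_circle_seq_cal_alt (j :: l) uptime =
      pvCore uptime (pvLookup j "time") (pvLookup j "seq") l := by
  induction l generalizing j with
  | nil => rfl
  | cons k l ih =>
      simp only [single_circle_seq_cal_alt, List.map_cons, List.drop_succ_cons, List.drop_zero,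
        List.zip_cons_cons, List.map_cons, List.filterMap_cons, pvCore] at *
      split_ifs with h <;> simp [← ih k]

lemma foldA_core (uptime : Int) (l : List (List (String × Int)))
    (stime sseq : List Int) (cnt t s : Int) (hc : 1 ≤ cnt) :
    (l.foldl (fun st j =>
      let tj := pvLookup j "time"
      let sj := pvLookup j "seq"
      if st.2.2.1 = 0 then (st.1, st.2.1, st.2.2.1 + 1, tj, sj)
      else if tj - st.2.2.2.1 > uptime then
        (st.1 ++ [tj - st.2.2.2.1],
         st.2.1 ++ [PySem.Int.mod (sj - st.2.2.2.2 + 4096) 4096],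
         st.2.2.1 + 1, tj, sj)
      else (st.1, st.2.1, st.2.2.1 + 1, tj, sj))
      (stime, sseq, cnt, t, s)).2.1 = sseq ++ pvCore uptime t s l := by
  induction l generalizing stime sseq cnt t s with
  | nil => simp [pvCore]
  | cons j l ih =>
      have hc0 : ¬ cnt = 0 := by omega
      simp only [List.foldl_cons, pvCore, hc0, if_false]
      split_ifs with h
      · rw [ih _ _ _ _ _ (by omega), pvmod_add]; simp
      · rw [ih _ _ _ _ _ (by omega)]; simp

-- ===== VERDICT (by name: the statement is the Claim_ definition above) =====
theorem single_circle_seq_cal_spec : Claim_equal_single_circle_seq_cal := by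
  intro raw_data uptime _ _
  unfold Spec_single_circle_seq_cal
  cases raw_data with
  | nil => rfl
  | cons j l =>
      rw [alt_cons]
      simp only [single_circle_seq_cal, List.foldl_cons]
      exact foldA_core uptime l [] [] 1 _ _ (by omega)
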